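-- pv_equiv track=rewrite | github.com/jooeun921/Algorithm_study | 백준/Silver/12789. 도키도키 간식드리미/도키도키 간식드리미.py | can_snake
-- ===== SOURCE A (Python) =====
-- from collections import deque
--
-- def can_snake(students):
--     queue = deque(students)
--     stack = []
--     number = 1
--
--     while queue or stack:
--         if queue and queue[0] == number:
--             queue.popleft()
--             number += 1
--         elif stack and stack[-1] == number:
--             stack.pop()
--             number += 1
--         elif queue:
--             stack.append(queue.popleft())
--         else:
--             return "Sad"
--     return "Nice"
-- ===== SOURCE B (Python) =====
-- def can_snake(students):
--     n = len(students)
--     if sorted(students) != list(range(1, n + 1)):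
--         return "Sad"
--     pos = [0] * (n + 1)
--     for i, v in enumerate(students):
--         pos[v] = i
--     work = [(0, n - 1, 1, n)]
--     while work:
--         l, r, lo, hi = work.pop()
--         if lo > hi:
--             continue
--         m = pos[hi]
--         if m < l or m > r:
--             return "Sad"
--         s = lo + (m - l)
--         work.append((l, m - 1, lo, s - 1))
--         work.append((m + 1, r, s, hi - 1))
--     return "Nice"
-- ===== Notes on version B (the rewrite author's own statement) =====
-- stated objective: alternative
-- what changed: Replaced the stack simulation by a structural criterion: B checks that students is a permutation of 1..n (sorted == range) and then verifies, by divide-and-conquer on the inverse-permutation array, that the sequence splits at its maximum into a left block of the small values and a right block of the large values, recursively (i.e. 231-pattern avoidance); no stack simulation at all.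
import Mathlib
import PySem

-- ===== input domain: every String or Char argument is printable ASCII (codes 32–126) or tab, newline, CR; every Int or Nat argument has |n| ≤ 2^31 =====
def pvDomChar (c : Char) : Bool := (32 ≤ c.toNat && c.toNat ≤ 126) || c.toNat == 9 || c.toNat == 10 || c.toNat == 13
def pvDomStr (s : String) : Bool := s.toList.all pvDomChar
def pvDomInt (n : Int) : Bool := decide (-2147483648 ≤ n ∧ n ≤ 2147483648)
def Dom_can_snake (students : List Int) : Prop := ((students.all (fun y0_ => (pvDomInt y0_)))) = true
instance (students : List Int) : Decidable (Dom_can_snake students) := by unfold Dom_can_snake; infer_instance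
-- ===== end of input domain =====

-- B replaces A's stack simulation by a structural test (objective: alternative algorithm):
-- B checks that students is a permutation of 1..n and then verifies by divide-and-conquer
-- on the inverse-permutation array that the list splits at its maximum into a block of the
-- small values followed by a block of the large values, recursively.


-- ===== PORT A =====
-- A's while-loop over (queue, stack, number); stack head = Python stack top.
-- Branch order as in A: queue-front match, stack-top match, push, else "Sad".
def loopA : List Int → List Int → Int → String
  | [], [], _ => "Nice"
  | [], y :: s, n => if y = n then loopA [] s (n + 1) else "Sad"
  | x :: q, [], n => if x = n then loopA q [] (n + 1) else loopA q [x] n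
  | x :: q, y :: s, n =>
    if x = n then loopA q (y :: s) (n + 1)
    else if y = n then loopA (x :: q) s (n + 1)
    else loopA q (x :: y :: s) n
termination_by q s _ => 2 * q.length + s.length
decreasing_by all_goals (simp only [List.length_cons]; omega)

def can_snake (students : List Int) : String := loopA students [] 1

-- ===== PORT B =====
-- pos = [0]*(n+1); for i, v in enumerate(students): pos[v] = i
def buildPos (students : List Int) (n : Int) : List Int :=
  (PySem.List.enumerate students 0).foldl
    (fun pos iv => PySem.List.pySetD pos iv.2 iv.1)
    (List.replicate (n + 1).toNat 0)

-- Source B's explicit worklist loop (Python pops the END of `work`; the Lean list head is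
-- that end, so the two children are consed in reverse append order — the identical
-- traversal).
def dcLoop (pos : List Int) (work : List (Int × Int × Int × Int)) : String :=
  match work with
  | [] => "Nice"
  | (l, r, lo, hi) :: rest =>
    if lo > hi then dcLoop pos rest
    else
      let m := PySem.List.pyGetD pos hi 0
      if m < l ∨ m > r then "Sad"
      else
        let s := lo + (m - l)
        dcLoop pos ((m + 1, r, s, hi - 1) :: (l, m - 1, lo, s - 1) :: rest)
termination_by (work.map (fun it => 2 * (it.2.1 + 1 - it.1).toNat + 1)).sum
decreasing_by
  all_goals simp only [List.map_cons, List.sum_cons]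
  · omega
  · omega

def can_snake_alt (students : List Int) : String :=
  let n : Int := students.length
  if PySem.List.sorted students (fun x => x) false = PySem.List.pyRange 1 (n + 1) 1 then
    dcLoop (buildPos students n) [(0, n - 1, 1, n)]
  else "Sad"

-- ===== PRECONDITION & SPEC =====
def Spec_can_snake (students : List Int) (out : String) : Prop := out = can_snake_alt students
instance (students : List Int) (out : String) : Decidable (Spec_can_snake students out) := by unfold Spec_can_snake; infer_instance

-- ===== CLAIM (what is proved, stated in full; the proofs are below) =====
def Claim_equal_can_snake : Prop := ∀ (students : List Int), Dom_can_snake students → Spec_can_snake students (can_snake students)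

-- ===== LEMMAS AND PROOFS =====

def drainB : List Int → Int → List Int × Int
  | [], n => ([], n)
  | y :: s, n => if y = n then drainB s (n + 1) else (y :: s, n)

-- recursive view of A's fold, used to bridge loopA to runS
def goB : List Int → List Int → Int → String
  | [], s, _ => if s = [] then "Nice" else "Sad"
  | x :: q, s, n => goB q (drainB (x :: s) n).1 (drainB (x :: s) n).2

def runS (q : List Int) (s : List Int) (n : Int) : List Int × Int :=
  q.foldl (fun st x => drainB (x :: st.1) st.2) (s, n)

theorem runS_nil (s : List Int) (n : Int) : runS [] s n = (s, n) := rfl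
theorem runS_cons (x : Int) (q s : List Int) (n : Int) :
    runS (x :: q) s n = runS q (drainB (x :: s) n).1 (drainB (x :: s) n).2 := rfl

theorem coe_cons_ms (x : Int) (l : List Int) :
    ((x :: l : List Int) : Multiset Int) = {x} + (l : Multiset Int) := by
  rw [← Multiset.cons_coe, ← Multiset.singleton_add]

theorem drainB_le (s : List Int) (n : Int) : n ≤ (drainB s n).2 := by
  induction s generalizing n with
  | nil => simp [drainB]
  | cons y s ih =>
    simp only [drainB]
    split
    · exact le_trans (by omega) (ih (n + 1))
    · simp

theorem drainB_mem_lt (s : List Int) (n m : Int) (hm : m ∈ s) (h : m < n) :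
    m ∈ (drainB s n).1 ∧ m < (drainB s n).2 := by
  induction s generalizing n with
  | nil => simp at hm
  | cons y s ih =>
    simp only [drainB]
    split
    · rename_i hy
      rcases List.mem_cons.mp hm with rfl | hm'
      · omega
      · exact ih (n + 1) hm' (by omega)
    · exact ⟨hm, h⟩

theorem goB_dead (q : List Int) (s : List Int) (n m : Int) (hm : m ∈ s) (h : m < n) :
    goB q s n = "Sad" := by
  induction q generalizing s n with
  | nil =>
    have : s ≠ [] := by intro hs; subst hs; simp at hm
    simp [goB, this]
  | cons x q ih =>
    have hd := drainB_mem_lt (x :: s) n m (List.mem_cons_of_mem _ hm) h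
    simpa [goB] using ih _ _ hd.1 hd.2

theorem loopA_eq_goB (q s : List Int) (n : Int) :
    loopA q s n = goB q (drainB s n).1 (drainB s n).2 := by
  induction q, s, n using loopA.induct with
  | case1 x => simp [loopA, drainB, goB]
  | case2 s n ih => simpa [loopA, drainB] using ih
  | case3 y s n hy => simp [loopA, drainB, hy, goB]
  | case4 q n ih => simpa [loopA, goB, drainB] using ih
  | case5 x q n hx ih => simpa [loopA, goB, drainB, hx] using ih
  | case6 q y s n ih =>
    by_cases hy : y = n
    · subst hy
      have hLHS : loopA (y :: q) (y :: s) y = "Sad" := by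
        have h1 : drainB (y :: s) (y + 1) = (y :: s, y + 1) := by
          have : (y : Int) ≠ y + 1 := by omega
          simp [drainB, this]
        rw [show loopA (y :: q) (y :: s) y = loopA q (y :: s) (y + 1) by simp [loopA]]
        rw [ih, h1]
        exact goB_dead q (y :: s) (y + 1) y (by simp) (by omega)
      have hd : drainB (y :: s) y = drainB s (y + 1) := by simp [drainB]
      have hle : y + 1 ≤ (drainB s (y + 1)).2 := drainB_le s (y + 1)
      have h2 : drainB (y :: (drainB s (y + 1)).1) (drainB s (y + 1)).2 =
          (y :: (drainB s (y + 1)).1, (drainB s (y + 1)).2) := by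
        have : (y : Int) ≠ (drainB s (y + 1)).2 := by omega
        simp [drainB, this]
      have hRHS : goB (y :: q) (drainB (y :: s) y).1 (drainB (y :: s) y).2 = "Sad" := by
        rw [hd]
        show goB q (drainB (y :: (drainB s (y + 1)).1) (drainB s (y + 1)).2).1 _ = _
        rw [h2]
        exact goB_dead q _ _ y (by simp) (by omega)
      rw [hLHS, hRHS]
    · have hd : drainB (y :: s) n = (y :: s, n) := by simp [drainB, hy]
      rw [show loopA (n :: q) (y :: s) n = loopA q (y :: s) (n + 1) by simp [loopA]]
      rw [ih, hd]
      show _ = goB q (drainB (n :: (y :: s)) n).1 (drainB (n :: (y :: s)) n).2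
      simp [drainB]
  | case7 x q s n hx ih =>
    have hd : drainB (n :: s) n = drainB s (n + 1) := by simp [drainB]
    rw [show loopA (x :: q) (n :: s) n = loopA (x :: q) s (n + 1) by simp [loopA, hx], ih, hd]
  | case8 x q y s n hx hy ih =>
    have hd : drainB (y :: s) n = (y :: s, n) := by simp [drainB, hy]
    rw [show loopA (x :: q) (y :: s) n = loopA q (x :: y :: s) n by simp [loopA, hx, hy], ih, hd]
    show _ = goB q (drainB (x :: y :: s) n).1 (drainB (x :: y :: s) n).2
    rfl

theorem goB_foldl (q : List Int) (s : List Int) (n : Int) :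
    goB q s n = (if (runS q s n).1 = [] then "Nice" else "Sad") := by
  induction q generalizing s n with
  | nil => simp [goB, runS]
  | cons x q ih => simp only [goB, runS, List.foldl_cons]; exact ih _ _

theorem can_snake_eq_runS (p : List Int) :
    can_snake p = (if (runS p [] 1).1 = [] then "Nice" else "Sad") := by
  have h := loopA_eq_goB p [] 1
  simp only [drainB] at h
  rw [can_snake, h, goB_foldl]

theorem drainB_decomp (s : List Int) (n : Int) :
    n ≤ (drainB s n).2 ∧ s = PySem.List.pyRange n (drainB s n).2 1 ++ (drainB s n).1 := by
  induction s generalizing n with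
  | nil => simp [drainB, PySem.List.pyRange_one_eq_nil]
  | cons y s ih =>
    by_cases hy : y = n
    · subst hy
      have hstep : drainB (y :: s) y = drainB s (y + 1) := by simp [drainB]
      rw [hstep]
      have h := ih (y + 1)
      refine ⟨by omega, ?_⟩
      rw [PySem.List.pyRange_one_cons (by omega)]
      simp only [List.cons_append]
      exact congrArg (y :: ·) h.2
    · have hstep : drainB (y :: s) n = (y :: s, n) := by simp [drainB, hy]
      rw [hstep]
      refine ⟨le_refl n, ?_⟩
      rw [PySem.List.pyRange_one_eq_nil (le_refl n)]
      rfl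

theorem ms_shift (a q d r b : Multiset Int) (h : q + d = r + b) :
    q + (a + d) = r + (a + b) := by
  calc q + (a + d) = a + (q + d) := by abel
    _ = a + (r + b) := by rw [h]
    _ = r + (a + b) := by abel

theorem runS_struct (q : List Int) (s : List Int) (n : Int) :
    n ≤ (runS q s n).2 ∧
    ((q ++ s : List Int) : Multiset Int) =
      ((runS q s n).1 : Multiset Int) + (PySem.List.pyRange n (runS q s n).2 1 : Multiset Int) := by
  induction q generalizing s n with
  | nil => simp [runS_nil, PySem.List.pyRange_one_eq_nil]
  | cons x q ih =>
    obtain ⟨hle, hdec⟩ := drainB_decomp (x :: s) n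
    obtain ⟨hle2, hmul⟩ := ih (drainB (x :: s) n).1 (drainB (x :: s) n).2
    rw [runS_cons]
    refine ⟨by omega, ?_⟩
    rw [PySem.List.pyRange_one_append n (drainB (x :: s) n).2 _ hle hle2]
    have h1 : ((x :: q ++ s : List Int) : Multiset Int)
        = ((q ++ (x :: s) : List Int) : Multiset Int) := by
      simp only [← Multiset.coe_add, coe_cons_ms]; abel
    rw [h1]
    conv_lhs => rw [hdec]
    simp only [← Multiset.coe_add] at hmul ⊢
    exact ms_shift _ _ _ _ _ hmul

theorem runS_inc (q : List Int) (s : List Int) (n : Int)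
    (h : (runS q s n).1 = []) : s.Pairwise (· < ·) ∧ ∀ y ∈ s, n ≤ y := by
  induction q generalizing s n with
  | nil =>
    rw [runS_nil] at h; subst h; simp
  | cons x q ih =>
    rw [runS_cons] at h
    obtain ⟨hpw, hge⟩ := ih _ _ h
    obtain ⟨hle, hdec⟩ := drainB_decomp (x :: s) n
    have hall : (x :: s).Pairwise (· < ·) := by
      rw [hdec]
      rw [List.pairwise_append]
      refine ⟨PySem.List.pairwise_lt_pyRange_one _ _, hpw, ?_⟩
      intro a ha b hb
      have ha' : a < (drainB (x :: s) n).2 := (PySem.List.mem_pyRange_one.mp ha).2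
      have hb' := hge b hb
      omega
    refine ⟨hall.of_cons, fun y hy => ?_⟩
    have hmem : y ∈ x :: s := List.mem_cons_of_mem _ hy
    rw [hdec] at hmem
    rcases List.mem_append.mp hmem with h1 | h1
    · exact (PySem.List.mem_pyRange_one.mp h1).1
    · exact le_trans hle (hge y h1)

theorem drainB_append_stop (u v : List Int) (m : Int) (h : (drainB u m).1 ≠ []) :
    drainB (u ++ v) m = ((drainB u m).1 ++ v, (drainB u m).2) := by
  induction u generalizing m with
  | nil => simp [drainB] at h
  | cons y u ih =>
    by_cases hy : y = m
    · subst hy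
      have h1 : drainB (y :: u) y = drainB u (y + 1) := by simp [drainB]
      have h2 : drainB (y :: (u ++ v)) y = drainB (u ++ v) (y + 1) := by simp [drainB]
      rw [h1] at h ⊢
      rw [show (y :: u) ++ v = y :: (u ++ v) from rfl]
      rw [h2]
      exact ih (y + 1) h
    · simp [drainB, hy]

theorem drainB_append_cross (u v : List Int) (m : Int) (h : (drainB u m).1 = []) :
    drainB (u ++ v) m = drainB v (drainB u m).2 := by
  induction u generalizing m with
  | nil => simp [drainB]
  | cons y u ih =>
    by_cases hy : y = m
    · subst hy
      have h1 : drainB (y :: u) y = drainB u (y + 1) := by simp [drainB]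
      have h2 : drainB (y :: (u ++ v)) y = drainB (u ++ v) (y + 1) := by simp [drainB]
      rw [h1] at h ⊢
      rw [show (y :: u) ++ v = y :: (u ++ v) from rfl]
      rw [h2]
      exact ih (y + 1) h
    · rw [show drainB (y :: u) m = (y :: u, m) from by simp [drainB, hy]] at h
      simp at h

theorem runS_sentinel (b : List Int) (t : List Int) (m c : Int)
    (hperm : ((b ++ t : List Int) : Multiset Int) = (PySem.List.pyRange m c 1 : Multiset Int)) :
    runS b (t ++ [c]) m =
      (if b ≠ [] ∧ runS b t m = ([], c) then ([], c + 1)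
       else ((runS b t m).1 ++ [c], (runS b t m).2)) := by
  induction b generalizing t m with
  | nil =>
    rw [runS_nil, runS_nil]
    simp
  | cons x b ih =>
    obtain ⟨hle, hdec⟩ := drainB_decomp (x :: t) m
    set m1 := (drainB (x :: t) m).2 with hm1
    set t1 := (drainB (x :: t) m).1 with ht1
    have hmemc : ∀ y ∈ (x :: b) ++ t, m ≤ y ∧ y < c := by
      intro y hy
      have : y ∈ PySem.List.pyRange m c 1 := by
        rw [← Multiset.mem_coe, ← hperm, Multiset.mem_coe]; exact hy
      exact PySem.List.mem_pyRange_one.mp this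
    have hm1c : m1 ≤ c := by
      by_cases hrange : m = m1
      · have hx := hmemc x (by simp)
        omega
      · have hmm : m1 - 1 ∈ PySem.List.pyRange m m1 1 := PySem.List.mem_pyRange_one.mpr (by omega)
        have hmm2 : m1 - 1 ∈ x :: t := by rw [hdec]; exact List.mem_append_left _ hmm
        rcases List.mem_cons.mp hmm2 with heq | hmem
        · have := hmemc (m1-1) (by simp [← heq]); omega
        · have := hmemc (m1-1) (List.mem_append.mpr (Or.inr hmem)); omega
    have hres : ((b ++ t1 : List Int) : Multiset Int) = (PySem.List.pyRange m1 c 1 : Multiset Int) := by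
      have hsplit : PySem.List.pyRange m c 1 =
          PySem.List.pyRange m m1 1 ++ PySem.List.pyRange m1 c 1 :=
        PySem.List.pyRange_one_append _ _ _ hle hm1c
      have h1 : ((x :: b ++ t : List Int) : Multiset Int)
          = ((b ++ (x :: t) : List Int) : Multiset Int) := by
        simp only [← Multiset.coe_add, coe_cons_ms]; abel
      rw [h1, hdec, hsplit] at hperm
      simp only [← Multiset.coe_add] at hperm ⊢
      have h2 : ((PySem.List.pyRange m m1 1 : List Int) : Multiset Int) + (((b : List Int) : Multiset Int) + ((t1 : List Int) : Multiset Int))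
          = ((PySem.List.pyRange m m1 1 : List Int) : Multiset Int) + ((PySem.List.pyRange m1 c 1 : List Int) : Multiset Int) := by
        calc ((PySem.List.pyRange m m1 1 : List Int) : Multiset Int) + (((b : List Int) : Multiset Int) + ((t1 : List Int) : Multiset Int))
            = ((b : List Int) : Multiset Int) + (((PySem.List.pyRange m m1 1 : List Int) : Multiset Int) + ((t1 : List Int) : Multiset Int)) := by abel
          _ = _ := hperm
      exact add_left_cancel h2
    by_cases hstop : t1 = []
    · have hbmul : ((b : List Int) : Multiset Int) = (PySem.List.pyRange m1 c 1 : Multiset Int) := by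
        have := hres
        rw [hstop] at this
        simpa using this
      by_cases hm1eq : m1 = c
      · have hb : b = [] := by
          have hnil : (PySem.List.pyRange m1 c 1) = ([] : List Int) :=
            PySem.List.pyRange_one_eq_nil (by omega)
          rw [hnil] at hbmul
          simpa using hbmul
        subst hb
        have hcross : drainB ((x :: t) ++ [c]) m = ([], c + 1) := by
          rw [drainB_append_cross _ _ _ (by rw [← ht1]; exact hstop)]
          rw [← hm1, hm1eq]
          simp [drainB]
        have hpar : runS [x] t m = ([], c) := by
          rw [runS_cons, ← ht1, ← hm1, hstop, hm1eq, runS_nil]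
        rw [show (x :: t) ++ [c] = x :: (t ++ [c]) from rfl] at hcross
        rw [runS_cons, hcross, runS_nil]
        rw [if_pos ⟨by simp, hpar⟩]
      · have hm1lt : m1 < c := lt_of_le_of_ne hm1c hm1eq
        have hone : drainB [c] m1 = ([c], m1) := by
          simp only [drainB]
          rw [if_neg (by omega : ¬ (c = m1))]
        have hcross : drainB ((x :: t) ++ [c]) m = ([c], m1) := by
          rw [drainB_append_cross _ _ _ (by rw [← ht1]; exact hstop), ← hm1, hone]
        have hres0 : ((b ++ ([] : List Int) : List Int) : Multiset Int) = (PySem.List.pyRange m1 c 1 : Multiset Int) := by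
          simpa using hbmul
        have hIH := ih [] m1 hres0
        rw [show (x :: t) ++ [c] = x :: (t ++ [c]) from rfl] at hcross
        rw [runS_cons, hcross]
        rw [show ([c] : List Int) = ([] : List Int) ++ [c] from rfl, hIH]
        rw [runS_cons, ← ht1, ← hm1, hstop]
        have hb : b ≠ [] := by
          intro hb; subst hb
          have hcard := congrArg Multiset.card hbmul
          simp [PySem.List.length_pyRange_one] at hcard
          omega
        have hcond : (b ≠ [] ∧ runS b [] m1 = ([], c)) ↔ ((x :: b) ≠ [] ∧ runS b [] m1 = ([], c)) := by
          constructor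
          · rintro ⟨_, h2⟩; exact ⟨by simp, h2⟩
          · rintro ⟨_, h2⟩; exact ⟨hb, h2⟩
        split_ifs with h1 h2 h2
        · rfl
        · exact absurd (hcond.mp h1) h2
        · exact absurd (hcond.mpr h2) h1
        · rfl
    · have hd2 : drainB ((x :: t) ++ [c]) m = (t1 ++ [c], m1) := by
        rw [drainB_append_stop _ _ _ (by rw [← ht1]; exact hstop), ← ht1, ← hm1]
      rw [show (x :: t) ++ [c] = x :: (t ++ [c]) from rfl] at hd2
      rw [runS_cons, hd2, ih t1 m1 hres, runS_cons, ← ht1, ← hm1]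
      have hcond : (b ≠ [] ∧ runS b t1 m1 = ([], c)) ↔ ((x :: b) ≠ [] ∧ runS b t1 m1 = ([], c)) := by
        constructor
        · rintro ⟨_, h2⟩; exact ⟨by simp, h2⟩
        · rintro ⟨_, h2⟩
          refine ⟨?_, h2⟩
          intro hb; subst hb
          rw [runS_nil] at h2
          exact hstop (congrArg Prod.fst h2 : t1 = [])
      split_ifs with h1 h2 h2
      · rfl
      · exact absurd (hcond.mp h1) h2
      · exact absurd (hcond.mpr h2) h1
      · rfl

inductive SOK : Int → List Int → Prop
  | nil (lo : Int) : SOK lo []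
  | node (lo : Int) (a b : List Int) :
      SOK lo a → SOK (lo + a.length) b →
      SOK lo (a ++ (lo + a.length + b.length) :: b)

theorem sok_runS (lo : Int) (p : List Int) (h : SOK lo p) :
    runS p [] lo = ([], lo + p.length) := by
  induction h with
  | nil lo => simp [runS_nil]
  | node lo a b ha hb iha ihb =>
    rw [show a ++ (lo + ↑a.length + ↑b.length) :: b = a ++ ((lo + ↑a.length + ↑b.length) :: b) from rfl]
    rw [show runS (a ++ ((lo + ↑a.length + ↑b.length) :: b)) [] lo
        = runS ((lo + ↑a.length + ↑b.length) :: b) (runS a [] lo).1 (runS a [] lo).2 from by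
      simp [runS, List.foldl_append]]
    rw [iha]
    rcases List.eq_nil_or_concat' b with hbnil | ⟨b', y, hby⟩
    · subst hbnil
      simp only [List.length_nil, Int.natCast_zero, add_zero]
      rw [runS_cons, runS_nil]
      have hd : drainB [lo + (a.length:Int)] (lo + (a.length:Int)) = ([], lo + (a.length:Int) + 1) := by
        simp [drainB]
      simp only [hd]
      have : lo + ↑a.length + 1 = lo + (↑(a ++ [lo + (a.length:Int)]).length : Int) := by
        simp only [List.length_append, List.length_cons, List.length_nil]
        push_cast
        ring
      rw [this]
    · have hbne : b ≠ [] := by rw [hby]; simp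
      set M := lo + (a.length : Int) + (b.length : Int) with hM
      have hblen : (0:Int) < (b.length : Int) := by
        rw [hby]; simp
      rw [runS_cons]
      have hdM : drainB (M :: []) (lo + (a.length:Int)) = ([M], lo + (a.length:Int)) := by
        simp only [drainB]
        rw [if_neg (by omega : ¬ (M = lo + (a.length:Int)))]
      rw [hdM]
      have hrs := runS_struct b [] (lo + (a.length:Int))
      rw [ihb] at hrs
      have hpermb : ((b ++ ([] : List Int) : List Int) : Multiset Int) =
          (PySem.List.pyRange (lo + (a.length:Int)) M 1 : Multiset Int) := by
        have h2 := hrs.2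
        simp only [List.append_nil] at h2 ⊢
        rw [h2]
        simp
      have hsen := runS_sentinel b [] (lo + (a.length:Int)) M hpermb
      rw [show ([] : List Int) ++ [M] = [M] from rfl] at hsen
      rw [hsen, if_pos ⟨hbne, by rw [ihb]⟩]
      have : M + 1 = lo + (↑(a ++ M :: b).length : Int) := by
        rw [hM]
        simp only [List.length_append, List.length_cons]
        push_cast
        ring
      rw [this]

theorem runS_sok (N : Nat) : ∀ (p : List Int) (lo : Int), p.length = N →
    (runS p [] lo).1 = [] → SOK lo p := by
  induction N using Nat.strong_induction_on with
  | _ N ih =>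
  intro p lo hN h
  rcases List.eq_nil_or_concat' p with rfl | ⟨p0, z, hp⟩
  · exact SOK.nil lo
  have hplen : 0 < p.length := by rw [hp]; simp
  clear hp
  obtain ⟨hle, hmul⟩ := runS_struct p [] lo
  set mf := (runS p [] lo).2 with hmf
  rw [h] at hmul
  simp only [List.append_nil] at hmul
  rw [show (([] : List Int) : Multiset Int) + (PySem.List.pyRange lo mf 1 : Multiset Int)
      = (PySem.List.pyRange lo mf 1 : Multiset Int) from by simp] at hmul
  have hlenr : (p.length : Int) = mf - lo := by
    have hc := congrArg Multiset.card hmul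
    simp [PySem.List.length_pyRange_one] at hc
    omega
  set M := lo + (p.length : Int) - 1 with hMdef
  have hMmem : M ∈ p := by
    have hm : M ∈ PySem.List.pyRange lo mf 1 := PySem.List.mem_pyRange_one.mpr (by omega)
    rw [← Multiset.mem_coe, ← hmul, Multiset.mem_coe] at hm
    exact hm
  obtain ⟨a, b, hab⟩ := List.append_of_mem hMmem
  obtain ⟨hlea, hmula⟩ := runS_struct a [] lo
  set ta := (runS a [] lo).1 with hta
  set ma := (runS a [] lo).2 with hma
  simp only [List.append_nil] at hmula
  have hlena : (a.length : Int) = (ta.length : Int) + (ma - lo) := by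
    have hc := congrArg Multiset.card hmula
    simp [PySem.List.length_pyRange_one] at hc
    omega
  have hlab : p.length = a.length + 1 + b.length := by rw [hab]; simp; omega
  have hmaM : ma ≤ M := by
    have h1 : (a.length : Int) ≤ (p.length : Int) - 1 := by push_cast [hlab]; omega
    omega
  have hrun2 : runS ((M :: b) : List Int) ta ma = runS p [] lo := by
    rw [hab, show a ++ M :: b = a ++ (M :: b) from rfl]
    simp only [runS, List.foldl_append]
    rfl
  by_cases hcase : ma = M
  · have htalen : ta.length = 0 := by
      have h2 : (a.length : Int) ≤ (p.length : Int) - 1 := by push_cast [hlab]; omega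
      omega
    have htaempty : ta = [] := List.length_eq_zero_iff.mp htalen
    have hbempty : b = [] := by
      have : (a.length : Int) = (p.length : Int) - 1 := by omega
      have : b.length = 0 := by push_cast [hlab] at this ⊢; omega
      exact List.length_eq_zero_iff.mp this
    have hsa : SOK lo a := by
      apply ih a.length (by omega) a lo rfl
      rw [← hta, htaempty]
    have hnode := SOK.node lo a [] hsa (SOK.nil _)
    simp only [List.length_nil, Int.natCast_zero, add_zero] at hnode
    have hM' : lo + (a.length : Int) = M := by
      have : (a.length : Int) = (p.length : Int) - 1 := by omega
      omega
    rw [hab, hbempty]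
    rwa [hM'] at hnode
  · have hmalt : ma < M := lt_of_le_of_ne hmaM hcase
    have hdM : drainB (M :: ta) ma = (M :: ta, ma) := by
      simp only [drainB]
      rw [if_neg (by omega : ¬ (M = ma))]
    have hfin : (runS b (M :: ta) ma).1 = [] := by
      rw [← h, ← hrun2, runS_cons, hdM]
    obtain ⟨hpw, _⟩ := runS_inc b (M :: ta) ma hfin
    have htaempty : ta = [] := by
      rcases List.eq_nil_or_concat' ta with h' | ⟨ta', y, hy⟩
      · exact h'
      · exfalso
        have hyta : y ∈ ta := by rw [hy]; simp
        have hyMgt : M < y := (List.pairwise_cons.mp hpw).1 y hyta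
        have hya : y ∈ a := by
          have hm : y ∈ ((a : List Int) : Multiset Int) := by
            rw [hmula]
            exact Multiset.mem_add.mpr (Or.inl (by simpa using hyta))
          simpa using hm
        have hyp : y ∈ p := by rw [hab]; exact List.mem_append.mpr (Or.inl hya)
        have hyr : y ∈ PySem.List.pyRange lo mf 1 := by
          rw [← Multiset.mem_coe, ← hmul, Multiset.mem_coe]; exact hyp
        have := PySem.List.mem_pyRange_one.mp hyr
        omega
    have hsa : SOK lo a := by
      apply ih a.length (by omega) a lo rfl
      rw [← hta, htaempty]
    have hmaval : ma = lo + (a.length : Int) := by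
      have : (ta.length : Int) = 0 := by rw [htaempty]; simp
      omega
    have hmulb : ((b : List Int) : Multiset Int) = (PySem.List.pyRange ma M 1 : Multiset Int) := by
      have hsplit1 : PySem.List.pyRange lo mf 1 =
          PySem.List.pyRange lo ma 1 ++ PySem.List.pyRange ma mf 1 :=
        PySem.List.pyRange_one_append _ _ _ (by omega) (by omega)
      have hsplit2 : PySem.List.pyRange ma mf 1 =
          PySem.List.pyRange ma M 1 ++ PySem.List.pyRange M mf 1 :=
        PySem.List.pyRange_one_append _ _ _ (by omega) (by omega)
      have hsingle : PySem.List.pyRange M mf 1 = [M] := by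
        rw [show mf = M + 1 from by omega]
        exact PySem.List.pyRange_one_singleton M
      have hmula' : ((a : List Int) : Multiset Int) = (PySem.List.pyRange lo ma 1 : Multiset Int) := by
        rw [hmula, htaempty]; simp
      rw [hab] at hmul
      rw [hsplit1, hsplit2, hsingle] at hmul
      have hlhs : ((a ++ M :: b : List Int) : Multiset Int) =
          (((a : List Int) : Multiset Int) + ((b : List Int) : Multiset Int)) + ({M} : Multiset Int) := by
        simp only [← Multiset.coe_add, coe_cons_ms]
        abel
      have hrhs : ((PySem.List.pyRange lo ma 1 ++ (PySem.List.pyRange ma M 1 ++ [M]) : List Int) : Multiset Int)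
          = (((PySem.List.pyRange lo ma 1 : List Int) : Multiset Int) + ((PySem.List.pyRange ma M 1 : List Int) : Multiset Int)) + ({M} : Multiset Int) := by
        simp only [← Multiset.coe_add, coe_cons_ms, Multiset.coe_nil]
        abel
      rw [hlhs, hrhs] at hmul
      have h5 := add_right_cancel hmul
      rw [hmula'] at h5
      exact add_left_cancel h5
    have hsen := runS_sentinel b [] ma M (by simpa using hmulb)
    rw [show ([] : List Int) ++ [M] = [M] from rfl] at hsen
    rw [htaempty] at hfin
    rw [show ((M :: []) : List Int) = [M] from rfl, hsen] at hfin
    split_ifs at hfin with hc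
    · obtain ⟨hbne, hbrun⟩ := hc
      have hsb : SOK ma b := by
        apply ih b.length (by omega) b ma rfl
        rw [hbrun]
      have hblen : (b.length : Int) = M - ma := by
        have hc2 := congrArg Multiset.card hmulb
        simp [PySem.List.length_pyRange_one] at hc2
        omega
      have hnode := SOK.node lo a b hsa (by rwa [← hmaval])
      have hMval : lo + (a.length : Int) + (b.length : Int) = M := by omega
      rw [hab]
      rwa [hMval] at hnode
    · simp at hfin

def dcOK (pos : List Int) (l r lo hi : Int) : Bool :=
  if lo > hi then true
  else
    let m := PySem.List.pyGetD pos hi 0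
    if m < l ∨ m > r then false
    else dcOK pos l (m - 1) lo (lo + (m - l) - 1) && dcOK pos (m + 1) r (lo + (m - l)) (hi - 1)
termination_by (r + 1 - l).toNat
decreasing_by
  · omega
  · omega

theorem dcLoop_all (pos : List Int) (work : List (Int × Int × Int × Int)) :
    dcLoop pos work =
      (if work.all (fun it => dcOK pos it.1 it.2.1 it.2.2.1 it.2.2.2) then "Nice" else "Sad") := by
  induction work using dcLoop.induct pos with
  | case1 => simp [dcLoop]
  | case2 l r lo hi rest hlo ih =>
    rw [dcLoop]
    simp only [if_pos hlo]
    rw [ih]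
    have hok : dcOK pos l r lo hi = true := by rw [dcOK, if_pos hlo]
    simp only [List.all_cons, hok, Bool.true_and]
  | case3 l r lo hi rest hlo m hm =>
    rw [dcLoop, if_neg hlo]
    change (if m < l ∨ m > r then "Sad"
      else dcLoop pos ((m + 1, r, lo + (m - l), hi - 1) :: (l, m - 1, lo, lo + (m - l) - 1) :: rest)) = _
    rw [if_pos hm]
    have hok : dcOK pos l r lo hi = false := by
      rw [dcOK, if_neg hlo]
      change (if m < l ∨ m > r then false
        else dcOK pos l (m - 1) lo (lo + (m - l) - 1) && dcOK pos (m + 1) r (lo + (m - l)) (hi - 1)) = _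
      rw [if_pos hm]
    simp [hok]
  | case4 l r lo hi rest hlo m hm s ih =>
    rw [dcLoop, if_neg hlo]
    change (if m < l ∨ m > r then "Sad"
      else dcLoop pos ((m + 1, r, lo + (m - l), hi - 1) :: (l, m - 1, lo, lo + (m - l) - 1) :: rest)) = _
    rw [if_neg hm]
    have ih' : dcLoop pos ((m + 1, r, lo + (m - l), hi - 1) :: (l, m - 1, lo, lo + (m - l) - 1) :: rest) =
        (if (((m + 1, r, lo + (m - l), hi - 1) :: (l, m - 1, lo, lo + (m - l) - 1) :: rest).all
            (fun it => dcOK pos it.1 it.2.1 it.2.2.1 it.2.2.2)) then "Nice" else "Sad") := ih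
    rw [ih']
    have hok : dcOK pos l r lo hi =
        (dcOK pos l (m - 1) lo (lo + (m - l) - 1) && dcOK pos (m + 1) r (lo + (m - l)) (hi - 1)) := by
      rw [dcOK, if_neg hlo]
      change (if m < l ∨ m > r then false
        else dcOK pos l (m - 1) lo (lo + (m - l) - 1) && dcOK pos (m + 1) r (lo + (m - l)) (hi - 1)) = _
      rw [if_neg hm]
    have hcomm : ∀ (u v w : Bool), (v && (u && w)) = ((u && v) && w) := by decide
    simp only [List.all_cons, hok, hcomm]

def sl (p : List Int) (l r : Int) : List Int := (p.drop l.toNat).take (r + 1 - l).toNat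

theorem sl_length (p : List Int) (l r : Int) (hl : 0 ≤ l) (hr : r < p.length) :
    (sl p l r).length = (r + 1 - l).toNat := by
  simp [sl, List.length_take, List.length_drop]
  omega

theorem sl_all (p : List Int) : sl p 0 ((p.length : Int) - 1) = p := by
  simp [sl]

theorem sl_split (p : List Int) (l m r : Int) (hl : 0 ≤ l) (hlm : l ≤ m) (hmr : m ≤ r)
    (hr : r < p.length) :
    sl p l r = sl p l (m - 1) ++ p[m.toNat]'(by omega) :: sl p (m + 1) r := by
  have hmlen : m.toNat < p.length := by omega
  have h1 : (r + 1 - l).toNat = (m - l).toNat + ((r - m).toNat + 1) := by omega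
  rw [sl, h1, List.take_add]
  congr 1
  · rw [sl, show ((m - 1) + 1 - l) = m - l from by ring]
  · have hdd : List.drop (m - l).toNat (List.drop l.toNat p) = List.drop m.toNat p := by
      rw [List.drop_drop]
      congr 1
      omega
    rw [hdd, List.drop_eq_getElem_cons hmlen, List.take_succ_cons]
    congr 1
    rw [sl, show (r + 1 - (m + 1)) = r - m from by ring,
      show (m + 1).toNat = m.toNat + 1 from by omega]

theorem pyGetD_oob (init : List Int) (v : Int) (hv : 0 ≤ v) (hlt : ¬ (v < (init.length : Int))) :
    PySem.List.pyGetD init v 0 = 0 := by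
  by_cases hneg : -(init.length : Int) ≤ v
  · have hne : (-v).toNat = 0 := by omega
    simp [PySem.List.pyGetD, PySem.List.pyGet?, PySem.List.pyIdx?, hv, hlt]
  · simp [PySem.List.pyGetD, PySem.List.pyGet?, PySem.List.pyIdx?, hv, hlt]

theorem foldlSet_untouched (ps : List (Int × Int)) (init : List Int) (v : Int)
    (hv : 0 ≤ v)
    (h : ∀ q ∈ ps, 0 ≤ q.2 ∧ q.2 ≠ v) :
    PySem.List.pyGetD (ps.foldl (fun pos iv => PySem.List.pySetD pos iv.2 iv.1) init) v 0 =
      PySem.List.pyGetD init v 0 := by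
  induction ps generalizing init with
  | nil => rfl
  | cons q ps ih =>
    rw [List.foldl_cons, ih _ (fun q hq => h q (List.mem_cons_of_mem _ hq))]
    obtain ⟨hq0, hqv⟩ := h q List.mem_cons_self
    rw [PySem.List.pySetD_of_nonneg _ _ hq0]
    by_cases hlt : v < init.length
    · rw [PySem.List.pyGetD_eq_getElem _ _ hv (by simpa [List.length_set] using hlt),
        PySem.List.pyGetD_eq_getElem _ _ hv (by simpa using hlt)]
      exact List.getElem_set_ne (by omega : q.2.toNat ≠ v.toNat) _
    · rw [pyGetD_oob _ _ hv (by simpa [List.length_set] using hlt),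
        pyGetD_oob _ _ hv (by simpa using hlt)]

theorem posRead (xs : List Int) (s : Int) (init : List Int) (k : Nat)
    (hk : k < xs.length) (hnd : xs.Nodup)
    (hb : ∀ y ∈ xs, 0 ≤ y ∧ y < init.length) :
    PySem.List.pyGetD
      ((PySem.List.enumerate xs s).foldl (fun pos iv => PySem.List.pySetD pos iv.2 iv.1) init)
      (xs[k]) 0 = s + k := by
  induction xs generalizing s init k with
  | nil => simp at hk
  | cons x xs ih =>
    rw [PySem.List.enumerate_cons, List.foldl_cons]
    rcases k with _ | k
    · simp only [List.getElem_cons_zero]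
      have hx := hb x (by simp)
      rw [foldlSet_untouched _ _ _ hx.1]
      · rw [PySem.List.pySetD_of_nonneg _ _ hx.1,
          PySem.List.pyGetD_eq_getElem _ _ hx.1 (by simpa [List.length_set] using hx.2)]
        rw [List.getElem_set_self]
        simp
      · intro q hq
        obtain ⟨j, hj, rfl⟩ := (PySem.List.mem_enumerate_iff xs (s+1) q).mp hq
        refine ⟨(hb _ (by simp [List.getElem_mem])).1, ?_⟩
        have : xs[j] ∈ xs := List.getElem_mem _
        intro hcon
        exact (List.nodup_cons.mp hnd).1 (hcon ▸ this)
    · simp only [List.getElem_cons_succ]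
      rw [ih (s + 1) _ k (by simpa using hk) (List.nodup_cons.mp hnd).2]
      · push_cast; ring
      · intro y hy
        have := hb y (List.mem_cons_of_mem _ hy)
        simpa [PySem.List.length_pySetD] using this

-- facts available once the permutation check has passed
theorem perm_nodup (p : List Int)
    (hperm : ((p : List Int) : Multiset Int) = (PySem.List.pyRange 1 ((p.length : Int) + 1) 1 : Multiset Int)) :
    p.Nodup := by
  have : Multiset.Nodup (p : Multiset Int) := by
    rw [hperm]
    exact (Multiset.coe_nodup).mpr (PySem.List.nodup_pyRange_one _ _)
  exact (Multiset.coe_nodup).mp this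

theorem perm_mem (p : List Int)
    (hperm : ((p : List Int) : Multiset Int) = (PySem.List.pyRange 1 ((p.length : Int) + 1) 1 : Multiset Int))
    (x : Int) : x ∈ p ↔ 1 ≤ x ∧ x ≤ (p.length : Int) := by
  rw [← Multiset.mem_coe, hperm, Multiset.mem_coe, PySem.List.mem_pyRange_one]
  omega

theorem posFact (p : List Int)
    (hperm : ((p : List Int) : Multiset Int) = (PySem.List.pyRange 1 ((p.length : Int) + 1) 1 : Multiset Int))
    (v : Int) (h1 : 1 ≤ v) (h2 : v ≤ (p.length : Int)) :
    ∃ (k : Nat) (hk : k < p.length), p[k] = v ∧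
      PySem.List.pyGetD (buildPos p p.length) v 0 = (k : Int) := by
  have hv : v ∈ p := (perm_mem p hperm v).mpr ⟨h1, h2⟩
  obtain ⟨k, hk, hkv⟩ := List.mem_iff_getElem.mp hv
  refine ⟨k, hk, hkv, ?_⟩
  rw [buildPos]
  rw [show v = p[k] from hkv.symm]
  have := posRead p 0 (List.replicate ((p.length : Int) + 1).toNat 0) k hk (perm_nodup p hperm)
    (fun y hy => by
      have := (perm_mem p hperm y).mp hy
      simp [List.length_replicate]
      omega)
  rw [this]
  simp

theorem dc_sok (p : List Int)
    (hperm : ((p : List Int) : Multiset Int) = (PySem.List.pyRange 1 ((p.length : Int) + 1) 1 : Multiset Int)) :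
    ∀ (fuel : Nat) (l r lo hi : Int), (r + 1 - l).toNat ≤ fuel →
      0 ≤ l → r < (p.length : Int) → r - l = hi - lo → 1 ≤ lo → hi ≤ (p.length : Int) →
      dcOK (buildPos p p.length) l r lo hi = true → SOK lo (sl p l r) := by
  intro fuel
  induction fuel with
  | zero =>
    intro l r lo hi hf h0 hr hd h1 hn hdc
    have : sl p l r = [] := by
      have : (r + 1 - l).toNat = 0 := by omega
      simp [sl, this]
    rw [this]; exact SOK.nil lo
  | succ fuel ih =>
    intro l r lo hi hf h0 hr hd h1 hn hdc
    by_cases hlo : lo > hi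
    · have : sl p l r = [] := by
        have : (r + 1 - l).toNat = 0 := by omega
        simp [sl, this]
      rw [this]; exact SOK.nil lo
    · rw [dcOK, if_neg hlo] at hdc
      obtain ⟨k, hk, hkv, hkpos⟩ := posFact p hperm hi (by omega) hn
      rw [hkpos] at hdc
      by_cases hc : ((k : Int) < l ∨ (k : Int) > r)
      · rw [if_pos hc] at hdc; exact absurd hdc (by simp)
      · rw [if_neg hc] at hdc
        rw [Bool.and_eq_true] at hdc
        have hklr : l ≤ (k : Int) ∧ (k : Int) ≤ r := by omega
        have hsplit := sl_split p l (k : Int) r h0 hklr.1 hklr.2 hr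
        have hleft : SOK lo (sl p l ((k : Int) - 1)) := by
          apply ih l ((k : Int) - 1) lo (lo + ((k : Int) - l) - 1) (by omega) h0 (by omega)
            (by omega) h1 (by omega) hdc.1
        have hright : SOK (lo + ((k : Int) - l)) (sl p ((k : Int) + 1) r) := by
          apply ih ((k : Int) + 1) r (lo + ((k : Int) - l)) (hi - 1) (by omega) (by omega) hr
            (by omega) (by omega) (by omega) hdc.2
        have hnode := SOK.node lo (sl p l ((k : Int) - 1)) (sl p ((k : Int) + 1) r) hleft
          (by
            have hlen : ((sl p l ((k : Int) - 1)).length : Int) = (k : Int) - l := by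
              rw [sl_length p l ((k : Int) - 1) h0 (by omega)]
              omega
            rwa [hlen])
        have hlen1 : ((sl p l ((k : Int) - 1)).length : Int) = (k : Int) - l := by
          rw [sl_length p l ((k : Int) - 1) h0 (by omega)]; omega
        have hlen2 : ((sl p ((k : Int) + 1) r).length : Int) = r - (k : Int) := by
          rw [sl_length p ((k : Int) + 1) r (by omega) hr]; omega
        rw [hsplit]
        have hk' : p[((k : Int)).toNat]'(by omega) = hi := by
          simp only [Int.toNat_natCast]
          exact hkv
        rw [hk']
        have hmid : lo + ((sl p l ((k : Int) - 1)).length : Int) + ((sl p ((k : Int) + 1) r).length : Int) = hi := by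
          omega
        rwa [hmid] at hnode

theorem sok_dc (p : List Int)
    (hperm : ((p : List Int) : Multiset Int) = (PySem.List.pyRange 1 ((p.length : Int) + 1) 1 : Multiset Int)) :
    ∀ (fuel : Nat) (l r lo hi : Int), (r + 1 - l).toNat ≤ fuel →
      0 ≤ l → r < (p.length : Int) → r - l = hi - lo → 1 ≤ lo → hi ≤ (p.length : Int) →
      SOK lo (sl p l r) → dcOK (buildPos p p.length) l r lo hi = true := by
  intro fuel
  induction fuel with
  | zero =>
    intro l r lo hi hf h0 hr hd h1 hn hsok
    rw [dcOK, if_pos (by omega : lo > hi)]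
  | succ fuel ih =>
    intro l r lo hi hf h0 hr hd h1 hn hsok
    by_cases hlo : lo > hi
    · rw [dcOK, if_pos hlo]
    · have hlr : l ≤ r := by omega
      have hlen : (sl p l r).length = (r + 1 - l).toNat := sl_length p l r h0 hr
      have hne : sl p l r ≠ [] := by
        intro hnil
        rw [hnil] at hlen
        simp at hlen
        omega
      generalize hq : sl p l r = q at hsok hne hlen
      cases hsok with
      | nil lo => exact absurd rfl hne
      | node lo a b ha hb =>
        have hlen' : (r + 1 - l).toNat = a.length + b.length + 1 := by
          rw [← hlen]; simp; omega
        set kI : Int := l + (a.length : Int) with hkI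
        have hbound : l ≤ kI ∧ kI ≤ r := by
          constructor
          · omega
          · omega
        have hsplit := sl_split p l kI r h0 hbound.1 hbound.2 hr
        rw [hq] at hsplit
        have hpl1 : (sl p l (kI - 1)).length = a.length := by
          rw [sl_length p l (kI - 1) h0 (by omega)]
          omega
        obtain ⟨hpre, hsuf⟩ := List.append_inj hsplit.symm (by rw [hpl1])
        have hmidval : p[kI.toNat]'(by omega) = lo + (a.length : Int) + (b.length : Int) := by
          have := List.cons.injEq .. ▸ hsuf
          exact (List.cons_eq_cons.mp hsuf).1
        have hbeq : sl p (kI + 1) r = b := (List.cons_eq_cons.mp hsuf).2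
        have hhi : lo + (a.length : Int) + (b.length : Int) = hi := by omega
        -- the pos array points at kI
        obtain ⟨k0, hk0, hk0v, hk0pos⟩ := posFact p hperm hi (by omega) hn
        have hkeq : k0 = kI.toNat := by
          have hklt : kI.toNat < p.length := by omega
          have h1 : p[kI.toNat]'hklt = hi := by rw [hmidval, hhi]
          have h2 : p[k0] = p[kI.toNat]'hklt := by rw [hk0v, h1]
          exact (List.Nodup.getElem_inj_iff (perm_nodup p hperm)).mp h2
        have hkpos' : PySem.List.pyGetD (buildPos p (p.length : Int)) hi 0 = kI := by
          rw [hk0pos, hkeq]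
          exact Int.toNat_of_nonneg (by omega)
        rw [dcOK, if_neg hlo]
        rw [hkpos']
        rw [if_neg (by omega : ¬ (kI < l ∨ kI > r))]
        rw [Bool.and_eq_true]
        constructor
        · apply ih l (kI - 1) lo (lo + (kI - l) - 1) (by omega) h0 (by omega) (by omega) h1 (by omega)
          rw [show sl p l (kI - 1) = a from hpre]
          have : lo + (kI - l) - 1 = lo + (a.length : Int) - 1 := by omega
          exact ha
        · apply ih (kI + 1) r (lo + (kI - l)) (hi - 1) (by omega) (by omega) hr (by omega) (by omega) (by omega)
          rw [hbeq]
          have : lo + (kI - l) = lo + (a.length : Int) := by omega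
          rw [this]
          exact hb

theorem sorted_iff_perm (p : List Int) :
    PySem.List.sorted p (fun x => x) false = PySem.List.pyRange 1 ((p.length : Int) + 1) 1 ↔
    ((p : List Int) : Multiset Int) = (PySem.List.pyRange 1 ((p.length : Int) + 1) 1 : Multiset Int) := by
  constructor
  · intro h
    have hp : (PySem.List.sorted p (fun x => x) false).Perm p := PySem.List.sorted_perm _ _ _
    rw [h] at hp
    exact (Multiset.coe_eq_coe.mpr hp.symm)
  · intro h
    have hp : (PySem.List.pyRange 1 ((p.length : Int) + 1) 1).Perm p :=
      (Multiset.coe_eq_coe.mp h).symm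
    exact PySem.List.sorted_eq_of_perm_of_pairwise_lt _ _ _ hp
      (PySem.List.pairwise_lt_pyRange_one _ _)

theorem main_final (p : List Int) :
    (if (runS p [] 1).1 = [] then "Nice" else "Sad") = can_snake_alt p := by
  show _ = (if PySem.List.sorted p (fun x => x) false = PySem.List.pyRange 1 ((p.length : Int) + 1) 1 then
    dcLoop (buildPos p (p.length : Int)) [(0, (p.length : Int) - 1, 1, (p.length : Int))] else "Sad")
  by_cases h : (runS p [] 1).1 = []
  · rw [if_pos h]
    have hsok := runS_sok p.length p 1 rfl h
    have hrun := sok_runS 1 p hsok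
    have hstr := (runS_struct p [] 1).2
    rw [hrun] at hstr
    have hperm : ((p : List Int) : Multiset Int) =
        (PySem.List.pyRange 1 ((p.length : Int) + 1) 1 : Multiset Int) := by
      have h2 : (1 : Int) + (p.length : Int) = (p.length : Int) + 1 := by ring
      simpa [h2] using hstr
    rw [if_pos ((sorted_iff_perm p).mpr hperm)]
    have hdc : dcOK (buildPos p (p.length : Int)) 0 ((p.length : Int) - 1) 1 (p.length : Int) = true := by
      apply sok_dc p hperm p.length 0 ((p.length : Int) - 1) 1 (p.length : Int)
        (by omega) (by omega) (by omega) (by omega) (by omega) (by omega)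
      rw [sl_all]
      exact hsok
    rw [dcLoop_all]
    simp [hdc]
  · rw [if_neg h]
    by_cases hs : PySem.List.sorted p (fun x => x) false = PySem.List.pyRange 1 ((p.length : Int) + 1) 1
    · rw [if_pos hs]
      have hperm := (sorted_iff_perm p).mp hs
      have hdc : dcOK (buildPos p (p.length : Int)) 0 ((p.length : Int) - 1) 1 (p.length : Int) = false := by
        by_contra hcon
        have htrue : dcOK (buildPos p (p.length : Int)) 0 ((p.length : Int) - 1) 1 (p.length : Int) = true := by
          cases hx : dcOK (buildPos p (p.length : Int)) 0 ((p.length : Int) - 1) 1 (p.length : Int)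
          · exact absurd hx hcon
          · rfl
        have hsok : SOK 1 (sl p 0 ((p.length : Int) - 1)) :=
          dc_sok p hperm p.length 0 ((p.length : Int) - 1) 1 (p.length : Int)
            (by omega) (by omega) (by omega) (by omega) (by omega) (by omega) htrue
        rw [sl_all] at hsok
        have := sok_runS 1 p hsok
        rw [this] at h
        exact h rfl
      rw [dcLoop_all]
      simp [hdc]
    · rw [if_neg hs]

-- ===== VERDICT (by name: the statement is the Claim_ definition above) =====
theorem can_snake_spec : Claim_equal_can_snake := by
  intro students _
  unfold Spec_can_snake
  rw [can_snake_eq_runS]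
  exact main_final students
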